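-- pv_equiv track=rewrite | github.com/MinecartRider/civ102 | test.py | find_moment
-- ===== SOURCE A (Python) =====
-- def find_moment(shear_forces, max_length):
--     current_shear = 0
--     current_moment = 0
--     moments = {}
--     for i in range(max_length):
--         current_moment += current_shear
--         moments[i] = current_moment
--         if i in shear_forces:
--             current_shear += shear_forces[i]
--     return moments
-- ===== SOURCE B (Python) =====
-- def find_moment(shear_forces, max_length):
--     # pass 1: build the shear profile (value recorded before adding this node's force)
--     shear = []
--     s = 0
--     for i in range(max_length):
--         shear.append(s)
--         if i in shear_forces:
--             s += shear_forces[i]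
--     # pass 2: integrate the shear profile into moments
--     moments = {}
--     m = 0
--     for i, v in enumerate(shear):
--         m += v
--         moments[i] = m
--     return moments
-- ===== Notes on version B (the rewrite author's own statement) =====
-- stated objective: alternative
-- what changed: Splits A's single fused integration loop into two passes: one building an explicit shear-profile list, and a second cumulative-sum pass over that list producing the moments.
import Mathlib
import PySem

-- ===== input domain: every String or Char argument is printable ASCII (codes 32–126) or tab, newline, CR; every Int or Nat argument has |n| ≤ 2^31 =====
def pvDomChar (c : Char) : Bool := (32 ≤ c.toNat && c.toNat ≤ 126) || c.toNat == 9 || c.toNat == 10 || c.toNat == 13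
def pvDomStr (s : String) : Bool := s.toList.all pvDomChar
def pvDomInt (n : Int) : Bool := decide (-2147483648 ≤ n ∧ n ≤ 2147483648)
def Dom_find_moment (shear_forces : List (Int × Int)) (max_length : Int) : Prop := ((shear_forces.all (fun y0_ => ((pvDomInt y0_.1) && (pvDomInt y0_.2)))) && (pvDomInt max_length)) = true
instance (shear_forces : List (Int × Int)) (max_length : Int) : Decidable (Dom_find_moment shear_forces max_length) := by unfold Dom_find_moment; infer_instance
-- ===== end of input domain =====

-- B splits A's single fused integration loop into two passes (shear profile, then cumulative sum); same cost, alternative decomposition.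

-- ===== PORT A =====
-- one loop iteration of A: add shear to moment, record it, then add this node's force
def fmStepA (sf : List (Int × Int)) (st : Int × Int × PySem.Dict Int Int) (i : Int) : Int × Int × PySem.Dict Int Int :=
  let cm := st.2.1 + st.1
  let d := st.2.2.insert i cm
  match PySem.Dict.get? (PySem.Dict.mk sf) i with
  | some v => (st.1 + v, cm, d)
  | none => (st.1, cm, d)

def find_moment (shear_forces : List (Int × Int)) (max_length : Int) : List (Int × Int) :=
  (((PySem.List.pyRange 0 max_length 1).foldl (fmStepA shear_forces) (0, 0, PySem.Dict.empty)).2.2).items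

-- ===== PORT B =====
-- pass 1 step: append current shear, then add this node's force
def fmStepS (sf : List (Int × Int)) (st : Int × List Int) (i : Int) : Int × List Int :=
  let sh := st.2 ++ [st.1]
  match PySem.Dict.get? (PySem.Dict.mk sf) i with
  | some v => (st.1 + v, sh)
  | none => (st.1, sh)

-- pass 2 step: cumulative sum of the shear profile
def fmStepM (st : Int × PySem.Dict Int Int) (p : Int × Int) : Int × PySem.Dict Int Int :=
  let m := st.1 + p.2
  (m, st.2.insert p.1 m)

def find_moment_alt (shear_forces : List (Int × Int)) (max_length : Int) : List (Int × Int) :=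
  let shear := ((PySem.List.pyRange 0 max_length 1).foldl (fmStepS shear_forces) (0, [])).2
  (((PySem.List.enumerate shear 0).foldl fmStepM (0, PySem.Dict.empty)).2).items

-- ===== PRECONDITION & SPEC =====
def Spec_find_moment (shear_forces : List (Int × Int)) (max_length : Int) (out : List (Int × Int)) : Prop := out = find_moment_alt shear_forces max_length
instance (shear_forces : List (Int × Int)) (max_length : Int) (out : List (Int × Int)) : Decidable (Spec_find_moment shear_forces max_length out) := by unfold Spec_find_moment; infer_instance

-- ===== CLAIM (what is proved, stated in full; the proofs are below) =====
def Claim_equal_find_moment : Prop := ∀ (shear_forces : List (Int × Int)) (max_length : Int), Dom_find_moment shear_forces max_length → Spec_find_moment shear_forces max_length (find_moment shear_forces max_length)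

-- ===== LEMMAS AND PROOFS =====

-- the shear-profile fold appends its list accumulator on the right
lemma fm_shear_acc (sf : List (Int × Int)) (l : List Int) :
    ∀ (c : Int) (acc : List Int),
      l.foldl (fmStepS sf) (c, acc) =
      ((l.foldl (fmStepS sf) (c, [])).1, acc ++ (l.foldl (fmStepS sf) (c, [])).2) := by
  induction l with
  | nil => intro c acc; simp
  | cons i l ih =>
    intro c acc
    simp only [List.foldl_cons]
    cases h : PySem.Dict.get? (PySem.Dict.mk sf) i <;>
      simp [fmStepS, h, ih _ (acc ++ [c]), ih _ [c]]

-- fused loop = shear-profile pass followed by the cumulative-sum pass, generalized over start and state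
lemma fm_main (sf : List (Int × Int)) :
    ∀ (n : Nat) (k cs cm : Int) (d : PySem.Dict Int Int),
      ((PySem.List.pyRange k (k + n) 1).foldl (fmStepA sf) (cs, cm, d)).2.2 =
      ((PySem.List.enumerate ((PySem.List.pyRange k (k + n) 1).foldl (fmStepS sf) (cs, [])).2 k).foldl
        fmStepM (cm, d)).2 := by
  intro n
  induction n with
  | zero =>
    intro k cs cm d
    rw [show k + ((0 : Nat) : Int) = k by omega, PySem.List.pyRange_one_eq_nil (le_refl k)]
    simp
  | succ n ih =>
    intro k cs cm d
    have hk : k < k + ((n + 1 : Nat) : Int) := by push_cast; omega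
    have hr : PySem.List.pyRange (k + 1) (k + ((n + 1 : Nat) : Int)) 1 =
        PySem.List.pyRange (k + 1) ((k + 1) + (n : Int)) 1 := by
      congr 1; push_cast; ring
    rw [PySem.List.pyRange_one_cons hk, hr]
    simp only [List.foldl_cons]
    cases h : PySem.Dict.get? (PySem.Dict.mk sf) k <;>
      simp [fmStepA, fmStepS, h, fm_shear_acc sf _ _ [cs], fmStepM, ih]

-- ===== VERDICT (by name: the statement is the Claim_ definition above) =====
theorem find_moment_spec : Claim_equal_find_moment := by
  unfold Claim_equal_find_moment Spec_find_moment
  intro sf ml _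
  unfold find_moment find_moment_alt
  by_cases h : ml ≤ 0
  · rw [PySem.List.pyRange_one_eq_nil h]
    simp
  · have h0 : (0 : Int) + ((ml.toNat : Nat) : Int) = ml := by omega
    have hm := fm_main sf ml.toNat 0 0 0 PySem.Dict.empty
    rw [h0] at hm
    exact congrArg PySem.Dict.items hm
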